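-- pv_equiv track=rewrite | github.com/Oluwafemi-Israel/hackerrank-problems | src/leetcode/min-moves-to-eliminate-three-consecutive-chars.py | solution
-- ===== SOURCE A (Python) =====
-- def solution(string):
--     i, j = 0, 1
--     moves = 0
--
--     while j < len(string):
--         if string[j] != string[i]:
--             moves += (j - i) // 3
--             i = j
--         j += 1
--
--     moves += (j - i) // 3
--
--     return moves
-- ===== SOURCE B (Python) =====
-- def _first_triple(s, start):
--     for i in range(start, len(s) - 2):
--         if s[i] == s[i + 1] == s[i + 2]:
--             return i
--     return None
--
--
-- def solution(string):
--     # Simulate the moves themselves: while some triple of equal consecutive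
--     # entries exists, repaint its third entry with a fresh marker (a move),
--     # and count how many repaints were needed.  A repaint never creates a
--     # triple before the one just broken, so the scan resumes at its index.
--     s = list(string)
--     moves = 0
--     start = 0
--     while True:
--         i = _first_triple(s, start)
--         if i is None:
--             return moves
--         s[i + 2] = object()  # fresh marker: equal to nothing, breaks the run
--         moves += 1
--         start = i
-- ===== Notes on version B (the rewrite author's own statement) =====
-- stated objective: alternative
-- what changed: Replaced A's arithmetic run counting (adding (j-i)//3 at each run boundary with two pointers) by a direct simulation of the moves: repeatedly find the first triple of equal consecutive entries, repaint its third entry with a fresh unmatchable marker, count the repaints, and resume the scan at the broken triple's index (a repaint never creates an earlier triple).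
import Mathlib
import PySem

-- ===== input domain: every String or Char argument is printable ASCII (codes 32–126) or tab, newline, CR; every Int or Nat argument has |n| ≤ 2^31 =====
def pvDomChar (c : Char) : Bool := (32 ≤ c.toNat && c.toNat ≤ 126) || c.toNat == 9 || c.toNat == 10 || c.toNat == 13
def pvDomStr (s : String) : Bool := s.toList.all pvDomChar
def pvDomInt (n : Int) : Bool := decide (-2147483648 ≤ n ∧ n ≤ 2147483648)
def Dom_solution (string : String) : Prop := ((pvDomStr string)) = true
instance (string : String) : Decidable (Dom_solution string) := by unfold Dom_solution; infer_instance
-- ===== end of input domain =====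

-- B replaces A's arithmetic run counting ((j - i) // 3 at run boundaries) by a direct
-- simulation of the moves: repeatedly find the first triple of equal consecutive entries,
-- repaint its third entry with a fresh marker, count the repaints, and resume the scan at
-- the broken triple's index (objective: alternative; a timing run measured B faster).

-- ===== PORT A =====
-- A's while loop: i, j are list indices (always 0 ≤ i < j, so pyGet? is exact here).
def solutionLoopA (cs : List Char) (i j : Nat) (moves : Int) : Int :=
  if h : j < cs.length then
    if PySem.List.pyGet? cs (j : Int) ≠ PySem.List.pyGet? cs (i : Int) then
      solutionLoopA cs j (j + 1) (moves + PySem.Int.floordiv ((j : Int) - (i : Int)) 3)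
    else
      solutionLoopA cs i (j + 1) moves
  else
    moves + PySem.Int.floordiv ((j : Int) - (i : Int)) 3
termination_by cs.length - j

def solution (string : String) : Int :=
  solutionLoopA string.toList 0 1 0

-- ===== PORT B =====
-- `none` models a fresh Python `object()` marker: it compares unequal to everything,
-- including other markers (object() uses identity equality).
def eqOC : Option Char → Option Char → Bool
  | some a, some b => a == b
  | _, _ => false

-- _first_triple(s, start): scan indices i = start, start+1, … for the first triple
-- of equal consecutive entries (range(start, len(s)-2) ⇔ i + 2 < len(s)).
def ftFrom (s : List (Option Char)) (i : Nat) : Option Nat :=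
  if h : i + 2 < s.length then
    if eqOC (s[i]'(by omega)) (s[i+1]'(by omega)) && eqOC (s[i+1]'(by omega)) (s[i+2]'h) then
      some i
    else ftFrom s (i + 1)
  else none
termination_by s.length - i

-- (the rest of this block is termination infrastructure for the port's while loop,
-- cited by name in its decreasing_by: each repaint blanks one still-genuine char)
def firstTriple : List (Option Char) → Option Nat
  | a :: b :: c :: r =>
    if eqOC a b && eqOC b c then some 0
    else (firstTriple (b :: c :: r)).map (· + 1)
  | _ => none

def countSome (s : List (Option Char)) : Nat := s.countP (·.isSome)

theorem ftFrom_eq (s : List (Option Char)) (i : Nat) :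
    ftFrom s i = (firstTriple (s.drop i)).map (· + i) := by
  generalize hn : s.length - i = n
  induction n generalizing i with
  | zero =>
    rw [ftFrom, dif_neg (by omega)]
    rw [List.drop_eq_nil_of_le (by omega)]
    rfl
  | succ n ih =>
    rw [ftFrom]
    by_cases h : i + 2 < s.length
    · rw [dif_pos h]
      obtain ⟨x, y, z, rest, hd⟩ : ∃ x y z rest, s.drop i = x :: y :: z :: rest := by
        have h3 : 3 ≤ (s.drop i).length := by simp; omega
        match hds : s.drop i with
        | [] => rw [hds] at h3; simp at h3
        | [a] => rw [hds] at h3; simp at h3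
        | [a, b] => rw [hds] at h3; simp at h3
        | a :: b :: c :: r => exact ⟨a, b, c, r, rfl⟩
      have hx : s[i]'(by omega) = x := by
        have := (List.getElem?_drop (xs := s) (i := i) (j := 0)).symm
        rw [hd] at this; simp at this
        simpa [List.getElem?_eq_getElem (by omega : i < s.length)] using this
      have hy : s[i+1]'(by omega) = y := by
        have := (List.getElem?_drop (xs := s) (i := i) (j := 1)).symm
        rw [hd] at this; simp at this
        simpa [List.getElem?_eq_getElem (by omega : i + 1 < s.length)] using this
      have hz : s[i+2]'h = z := by
        have := (List.getElem?_drop (xs := s) (i := i) (j := 2)).symm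
        rw [hd] at this; simp at this
        simpa [List.getElem?_eq_getElem h] using this
      rw [hx, hy, hz, hd, firstTriple]
      by_cases ht : (eqOC x y && eqOC y z) = true
      · rw [if_pos ht, if_pos ht]; simp
      · rw [if_neg ht, if_neg ht]
        rw [ih (i + 1) (by omega)]
        have hdrop : s.drop (i + 1) = y :: z :: rest := by
          have := (List.drop_drop (i := 1) (j := i) (l := s))
          rw [hd] at this
          simpa using this.symm
        rw [hdrop]
        cases firstTriple (y :: z :: rest) with
        | none => simp
        | some v => simp; omega
    · rw [dif_neg h]
      have : (s.drop i).length ≤ 2 := by simp; omega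
      match hds : s.drop i with
      | [] => rfl
      | [a] => rfl
      | [a, b] => rfl
      | a :: b :: c :: r => rw [hds] at this; simp at this

theorem firstTriple_some_getElem (s : List (Option Char)) (i : Nat)
    (h : firstTriple s = some i) :
    ∃ ch : Char, s[i]? = some (some ch) ∧ s[i+1]? = some (some ch) ∧ s[i+2]? = some (some ch) := by
  induction s generalizing i with
  | nil => simp [firstTriple] at h
  | cons a t ih =>
    match t with
    | [] => simp [firstTriple] at h
    | [b] => simp [firstTriple] at h
    | b :: c :: r =>
      rw [firstTriple] at h
      by_cases ht : (eqOC a b && eqOC b c) = true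
      · rw [if_pos ht] at h
        obtain ⟨rfl⟩ : i = 0 := by simpa using h.symm
        simp only [Bool.and_eq_true] at ht
        obtain ⟨h1, h2⟩ := ht
        match a, b, c, h1, h2 with
        | some x, some y, some z, h1, h2 =>
          simp only [eqOC, beq_iff_eq] at h1 h2
          subst h1; subst h2
          exact ⟨x, by simp, by simp, by simp⟩
      · rw [if_neg ht] at h
        obtain ⟨j, hj, rfl⟩ := Option.map_eq_some_iff.mp h
        obtain ⟨ch, h1, h2, h3⟩ := ih j hj
        exact ⟨ch, by simpa using h1, by simpa using h2, by simpa using h3⟩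

theorem countSome_set_none (s : List (Option Char)) (j : Nat) (ch : Char)
    (h : s[j]? = some (some ch)) : countSome (s.set j none) + 1 = countSome s := by
  induction s generalizing j with
  | nil => simp at h
  | cons a t ih =>
    cases j with
    | zero =>
      simp at h
      simp [countSome, h]
    | succ j =>
      simp at h
      have := ih j h
      simp only [List.set_cons_succ, countSome, List.countP_cons] at *
      omega

theorem countSome_decreases (s : List (Option Char)) (start i : Nat)
    (h : ftFrom s start = some i) : countSome (s.set (i + 2) none) < countSome s := by
  rw [ftFrom_eq] at h
  obtain ⟨j, hj, hji⟩ := Option.map_eq_some_iff.mp h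
  obtain ⟨ch, _, _, h3⟩ := firstTriple_some_getElem _ _ hj
  rw [List.getElem?_drop] at h3
  have h3' : s[i + 2]? = some (some ch) := by
    rw [show i + 2 = start + (j + 2) by omega]; exact h3
  have := countSome_set_none s (i + 2) ch h3'
  omega

-- B's while loop: repaint the third entry of the first triple found at or after
-- `start`, count the move, and resume the scan at that triple's index.
def loopB (s : List (Option Char)) (moves : Int) (start : Nat) : Int :=
  match h : ftFrom s start with
  | none => moves
  | some i => loopB (s.set (i + 2) none) (moves + 1) i
termination_by countSome s
decreasing_by exact countSome_decreases s start i h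

def solution_alt (string : String) : Int :=
  loopB (string.toList.map some) 0 0

-- ===== PRECONDITION & SPEC =====
def Spec_solution (string : String) (out : Int) : Prop := out = solution_alt string
instance (string : String) (out : Int) : Decidable (Spec_solution string out) := by unfold Spec_solution; infer_instance

-- ===== CLAIM (what is proved, stated in full; the proofs are below) =====
def Claim_equal_solution : Prop := ∀ (string : String), Dom_solution string → Spec_solution string (solution string)

-- ===== LEMMAS AND PROOFS =====

-- canonical count: one pass with (prev, run length c), +1 each time c hits a multiple of 3
def gAux : List (Option Char) → Option Char → Int → Int
  | [], _, _ => 0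
  | x :: r, prev, c =>
    let c' := if eqOC x prev then c + 1 else 1
    (if PySem.Int.mod c' 3 = 0 then 1 else 0) + gAux r x c'

theorem gAux_cons (x : Option Char) (r : List (Option Char)) (p : Option Char) (c : Int) :
    gAux (x :: r) p c =
      (if PySem.Int.mod (if eqOC x p then c + 1 else 1) 3 = 0 then 1 else 0)
        + gAux r x (if eqOC x p then c + 1 else 1) := rfl

theorem eqOC_iff (x y : Option Char) : eqOC x y = true ↔ ∃ ch, x = some ch ∧ y = some ch := by
  match x, y with
  | some a, some b =>
    simp only [eqOC, beq_iff_eq, Option.some.injEq]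
    constructor
    · rintro rfl; exact ⟨a, rfl, rfl⟩
    · rintro ⟨ch, rfl, rfl⟩; rfl
  | some a, none => simp [eqOC]
  | none, b => simp [eqOC]

theorem gAux_congr (r : List (Option Char)) (p : Option Char) (c1 c2 : Int)
    (h1 : 0 ≤ c1) (h2 : 0 ≤ c2) (h : PySem.Int.mod c1 3 = PySem.Int.mod c2 3) :
    gAux r p c1 = gAux r p c2 := by
  induction r generalizing p c1 c2 with
  | nil => simp [gAux]
  | cons x t ih =>
    rw [gAux, gAux]
    simp only [PySem.Int.mod_eq_emod_of_pos (by omega : (0:Int) < 3)] at h ⊢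
    by_cases hx : eqOC x p = true
    · simp only [if_pos hx]
      have hm : (c1 + 1) % 3 = (c2 + 1) % 3 := by omega
      rw [ih x (c1+1) (c2+1) (by omega) (by omega)
          (by simpa [PySem.Int.mod_eq_emod_of_pos (by omega : (0:Int) < 3)] using hm), hm]
    · simp only [if_neg hx]

theorem firstTriple_tail (a : Option Char) (s : List (Option Char))
    (h : firstTriple (a :: s) = none) : firstTriple s = none := by
  match s with
  | [] => rfl
  | [b] => rfl
  | b :: c :: r =>
    rw [firstTriple] at h
    by_cases ht : (eqOC a b && eqOC b c) = true
    · rw [if_pos ht] at h; simp at h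
    · rw [if_neg ht] at h
      simpa using h

theorem gAux_noTriple (s : List (Option Char)) (prev : Option Char) (c : Int)
    (hnt : firstTriple (prev :: s) = none) (hc0 : 0 ≤ c)
    (hc : ∀ x r, s = x :: r → eqOC x prev = true → c ≤ 1) :
    gAux s prev c = 0 := by
  induction s generalizing prev c with
  | nil => simp [gAux]
  | cons x r ih =>
    rw [gAux]
    by_cases hx : eqOC x prev = true
    · have hle : c ≤ 1 := hc x r rfl hx
      simp only [if_pos hx]
      have hmod : PySem.Int.mod (c + 1) 3 ≠ 0 := by
        rw [PySem.Int.mod_eq_emod_of_pos (by omega)]; omega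
      rw [if_neg hmod, ih x (c+1) (firstTriple_tail prev (x :: r) hnt) (by omega) ?_]
      · ring
      · intro y r' hr hy
        exfalso
        subst hr
        obtain ⟨ch, hx1, hp⟩ := (eqOC_iff x prev).mp hx
        obtain ⟨ch', hy1, hx2⟩ := (eqOC_iff y x).mp hy
        rw [hx1] at hx2
        obtain ⟨rfl⟩ : ch' = ch := by simpa using hx2.symm
        rw [firstTriple] at hnt
        rw [if_pos (by simp [hp, hx1, hy1, eqOC])] at hnt
        simp at hnt
    · simp only [if_neg hx]
      have hmod : PySem.Int.mod (1 : Int) 3 ≠ 0 := by decide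
      rw [if_neg hmod, ih x 1 (firstTriple_tail prev (x :: r) hnt) (by omega) ?_]
      · ring
      · intro y r' hr hy; omega

theorem gAux_prev_mod0 (r : List (Option Char)) (p : Option Char) (c : Int)
    (h0 : 0 ≤ c) (hm : PySem.Int.mod c 3 = 0) :
    gAux r p c = gAux r none 1 := by
  match r with
  | [] => simp [gAux]
  | y :: r' =>
    rw [gAux, gAux]
    have hyn : eqOC y none = false := by cases y <;> rfl
    rw [hyn]
    simp only [if_neg (by simp : ¬ (false = true))]
    by_cases hy : eqOC y p = true
    · simp only [if_pos hy]
      have hmod : PySem.Int.mod (c + 1) 3 ≠ 0 := by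
        rw [PySem.Int.mod_eq_emod_of_pos (by omega)] at hm ⊢; omega
      rw [if_neg hmod, if_neg (by decide : ¬ PySem.Int.mod (1:Int) 3 = 0)]
      rw [gAux_congr r' y (c+1) 1 (by omega) (by omega) ?_]
      simp only [PySem.Int.mod_eq_emod_of_pos (show (0:Int) < 3 by omega)] at hm ⊢; omega
    · simp only [if_neg hy]

-- first triple at index i+1 of (prev :: s): repainting entry i+2 of s removes exactly one move
theorem gAux_step (i : Nat) (s : List (Option Char)) (prev : Option Char) (c : Int)
    (h0 : 0 ≤ c) (h : firstTriple (prev :: s) = some (i + 1)) :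
    gAux s prev c = gAux (s.set (i + 2) none) prev c + 1 := by
  induction i generalizing s prev c with
  | zero =>
    match s with
    | [] => simp [firstTriple] at h
    | [a] => simp [firstTriple] at h
    | a :: b :: r =>
      rw [firstTriple] at h
      by_cases ht : (eqOC prev a && eqOC a b) = true
      · rw [if_pos ht] at h; simp at h
      · rw [if_neg ht] at h
        obtain ⟨j, hj, hj1⟩ := Option.map_eq_some_iff.mp h
        obtain ⟨rfl⟩ : j = 0 := by omega
        -- firstTriple (a :: b :: r) = some 0: a = b = head of r = some ch
        match r with
        | [] => simp [firstTriple] at hj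
        | c0 :: r' =>
          rw [firstTriple] at hj
          by_cases ht2 : (eqOC a b && eqOC b c0) = true
          · simp only [Bool.and_eq_true] at ht2
            obtain ⟨hab, hbc⟩ := ht2
            obtain ⟨ch, ha, hb⟩ := (eqOC_iff a b).mp hab
            obtain ⟨ch', hb', hc0⟩ := (eqOC_iff b c0).mp hbc
            rw [hb] at hb'
            have hcc : ch' = ch := by injection hb' with hh; exact hh.symm
            rw [hcc] at hc0
            subst ha; subst hb; subst hc0
            have hpr : eqOC prev (some ch) = false := by
              cases hx : eqOC prev (some ch) with
              | false => rfl
              | true => exact absurd (by rw [hx]; simp [eqOC]) ht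
            have hpne : eqOC (some ch) prev = false := by
              cases hx : eqOC (some ch) prev with
              | false => rfl
              | true =>
                obtain ⟨ch2, he1, he2⟩ := (eqOC_iff _ _).mp hx
                have hcc2 : ch2 = ch := by injection he1 with hh; exact hh.symm
                rw [hcc2] at he2
                rw [he2] at hpr
                simp [eqOC] at hpr
            show gAux (some ch :: some ch :: some ch :: r') prev c
               = gAux (some ch :: some ch :: none :: r') prev c + 1
            have e1 : eqOC (some ch) (some ch) = true := by simp [eqOC]
            have e2 : eqOC (none : Option Char) (some ch) = false := rfl
            simp only [gAux, hpne, e1, e2, Bool.false_eq_true, if_false, if_true]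
            norm_num
            rw [gAux_prev_mod0 r' (some ch) 3 (by omega) (by decide)]
            ring
          · rw [if_neg ht2] at hj
            obtain ⟨j', _, hj'⟩ := Option.map_eq_some_iff.mp hj
            omega
  | succ i ih =>
    match s with
    | [] => simp [firstTriple] at h
    | [a] => simp [firstTriple] at h
    | a :: b :: r =>
      rw [firstTriple] at h
      by_cases ht : (eqOC prev a && eqOC a b) = true
      · rw [if_pos ht] at h; simp at h
      · rw [if_neg ht] at h
        obtain ⟨j, hj, hj1⟩ := Option.map_eq_some_iff.mp h
        obtain ⟨rfl⟩ : j = i + 1 := by omega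
        show gAux (a :: (b :: r)) prev c
           = gAux ((a :: (b :: r)).set (i + 3) none) prev c + 1
        rw [List.set_cons_succ]
        rw [gAux_cons]
        conv_rhs => rw [gAux_cons]
        have := ih (b :: r) a (if eqOC a prev then c + 1 else 1)
          (by split <;> omega) hj
        rw [this]
        ring

theorem noEarly (i : Nat) : ∀ s : List (Option Char), firstTriple s = some i →
    firstTriple (s.set (i + 2) none) = ftFrom (s.set (i + 2) none) i := by
  induction i with
  | zero =>
    intro s h
    rw [ftFrom_eq, List.drop_zero]
    cases firstTriple (s.set (0 + 2) none) <;> simp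
  | succ i ih =>
    intro s h
    match s with
    | [] => simp [firstTriple] at h
    | [a] => simp [firstTriple] at h
    | [a, b] => simp [firstTriple] at h
    | a :: b :: c :: r =>
      rw [firstTriple] at h
      by_cases ht : (eqOC a b && eqOC b c) = true
      · rw [if_pos ht] at h; simp at h
      · rw [if_neg ht] at h
        obtain ⟨j, hj, hj1⟩ := Option.map_eq_some_iff.mp h
        have hj2 : firstTriple (b :: c :: r) = some i := by
          rw [hj]; exact congrArg some (by omega)
        have hIH := ih (b :: c :: r) hj2
        rw [ftFrom_eq] at hIH
        have hX : (b :: c :: r).set (i + 2) none = b :: c :: r.set i none := rfl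
        rw [hX] at hIH
        show firstTriple (a :: b :: c :: r.set i none) = ftFrom (a :: b :: c :: r.set i none) (i + 1)
        rw [firstTriple, if_neg ht, ftFrom_eq, hIH, List.drop_succ_cons]
        cases firstTriple ((b :: c :: r.set i none).drop i) with
        | none => simp
        | some v => simp; omega

theorem loopB_eq_gAux (n : Nat) (s : List (Option Char)) (m : Int) (start : Nat)
    (hn : countSome s = n) (hinv : firstTriple s = ftFrom s start) :
    loopB s m start = m + gAux s none 0 := by
  induction n using Nat.strong_induction_on generalizing s m start with
  | _ n ih =>
    rw [loopB]
    split
    next hft =>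
      have hglob : firstTriple s = none := by rw [hinv, hft]
      have hnone : firstTriple ((none : Option Char) :: s) = none := by
        match s with
        | [] => rfl
        | [a] => rfl
        | a :: b :: r =>
          rw [firstTriple]
          rw [if_neg (by simp [eqOC])]
          rw [hglob]; rfl
      rw [gAux_noTriple s none 0 hnone (by omega) (by intro x r hr hx; omega)]
      ring
    next i hft =>
      have hglob : firstTriple s = some i := by rw [hinv, hft]
      have hdec := countSome_decreases s start i hft
      have hcons : firstTriple ((none : Option Char) :: s) = some (i + 1) := by
        match s with
        | [] => simp [firstTriple] at hglob
        | [a] => simp [firstTriple] at hglob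
        | a :: b :: r =>
          rw [firstTriple, if_neg (by simp [eqOC]), hglob]; rfl
      rw [ih (countSome (s.set (i + 2) none)) (by omega) _ _ _ rfl (noEarly i s hglob)]
      rw [gAux_step i s none 0 (by omega) hcons]
      ring

-- ===== A-side: structural reformulation of A's loop (c = char at i, k = j - i) =====
def loopA' : List Char → Char → Int → Int → Int
  | [], _, k, moves => moves + PySem.Int.floordiv k 3
  | x :: rest, c, k, moves =>
    if x ≠ c then loopA' rest x 1 (moves + PySem.Int.floordiv k 3)
    else loopA' rest c (k + 1) moves

theorem floordiv_succ_three (k : Int) :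
    PySem.Int.floordiv (k + 1) 3 =
      PySem.Int.floordiv k 3 + (if PySem.Int.mod (k + 1) 3 = 0 then 1 else 0) := by
  rw [PySem.Int.floordiv_eq_ediv_of_pos (by omega), PySem.Int.floordiv_eq_ediv_of_pos (by omega),
      PySem.Int.mod_eq_emod_of_pos (by omega)]
  split_ifs with h <;> omega

theorem bridgeA (n : ℕ) (cs : List Char) (i j : Nat) (moves : Int) (c : Char)
    (hn : cs.length - j = n) (hij : i ≤ j) (hc : PySem.List.pyGet? cs (i : Int) = some c) :
    solutionLoopA cs i j moves = loopA' (cs.drop j) c ((j : Int) - (i : Int)) moves := by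
  induction n generalizing i j moves c with
  | zero =>
    have hj : ¬ j < cs.length := by omega
    rw [solutionLoopA, dif_neg hj, List.drop_eq_nil_of_le (by omega), loopA']
  | succ n ih =>
    have hj : j < cs.length := by omega
    obtain ⟨x, rest, hd⟩ : ∃ x rest, cs.drop j = x :: rest := by
      cases hcs : cs.drop j with
      | nil => exfalso; have := List.length_drop (l := cs) (i := j); rw [hcs] at this; simp at this; omega
      | cons x rest => exact ⟨x, rest, rfl⟩
    have hrest : cs.drop (j + 1) = rest := by
      have := List.drop_drop (i := 1) (j := j) (l := cs)
      rw [hd] at this; simpa using this.symm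
    have hxj : PySem.List.pyGet? cs (j : Int) = some x := by
      rw [PySem.List.pyGet?_natCast]
      have : (cs.drop j)[0]? = cs[j]? := by
        rw [List.getElem?_drop]; simp
      rw [← this, hd]; simp
    rw [solutionLoopA, dif_pos hj, hd, loopA']
    by_cases hne : x = c
    · subst hne
      rw [if_neg (by simp [hxj, hc]), if_neg (by simp)]
      rw [ih i (j + 1) moves x (by omega) (by omega) hc, hrest]
      have : ((j : Int) + 1) - (i : Int) = ((j : Int) - (i : Int)) + 1 := by ring
      push_cast
      rw [this]
    · rw [if_pos (by simp [hxj, hc, hne]), if_pos (by simp [hne])]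
      rw [ih j (j + 1) _ x (by omega) (by omega) hxj, hrest]
      push_cast
      simp

theorem mainA_gAux (xs : List Char) (c : Char) (k moves : Int) (hk : 0 ≤ k) :
    loopA' xs c k moves = moves + PySem.Int.floordiv k 3 + gAux (xs.map some) (some c) k := by
  induction xs generalizing c k moves with
  | nil => simp [loopA', gAux]
  | cons x rest ih =>
    rw [loopA']
    simp only [List.map_cons]
    rw [gAux_cons]
    by_cases hx : x = c
    · subst hx
      rw [if_neg (by simp)]
      have e1 : eqOC (some x) (some x) = true := by simp [eqOC]
      simp only [e1, if_true]
      rw [ih x (k + 1) moves (by omega), floordiv_succ_three k]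
      by_cases hm : PySem.Int.mod (k + 1) 3 = 0
      · simp only [hm, if_true]
        ring
      · simp only [if_neg hm]
        ring
    · rw [if_pos (by simp [hx])]
      have e2 : eqOC (some x) (some c) = false := by simp [eqOC, hx]
      simp only [e2, Bool.false_eq_true, if_false]
      rw [ih x 1 (moves + PySem.Int.floordiv k 3) (by omega)]
      rw [if_neg (by decide : ¬ PySem.Int.mod (1:Int) 3 = 0)]
      rw [show PySem.Int.floordiv (1 : Int) 3 = 0 by decide]
      ring

-- ===== VERDICT (by name: the statement is the Claim_ definition above) =====
theorem solution_spec : Claim_equal_solution := by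
  intro s _
  unfold Spec_solution solution solution_alt
  cases hcs : s.toList with
  | nil =>
    rw [solutionLoopA, dif_neg (by simp)]
    simp only [List.map_nil]
    rw [loopB_eq_gAux 0 [] 0 0 rfl (by rw [ftFrom_eq]; rfl)]
    simp [gAux]
  | cons x rest =>
    have hc : PySem.List.pyGet? (x :: rest) ((0 : Nat) : Int) = some x := by simp
    rw [bridgeA rest.length (x :: rest) 0 1 0 x (by simp) (by omega) hc]
    have hdrop : (x :: rest).drop 1 = rest := by simp
    rw [hdrop]
    have hcast : ((1 : Nat) : Int) - ((0 : Nat) : Int) = 1 := by norm_num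
    rw [hcast]
    rw [mainA_gAux rest x 1 0 (by omega)]
    have hinv0 : firstTriple ((x :: rest).map some) = ftFrom ((x :: rest).map some) 0 := by
      rw [ftFrom_eq, List.drop_zero]
      cases firstTriple ((x :: rest).map some) <;> simp
    rw [loopB_eq_gAux (countSome ((x :: rest).map some)) _ 0 0 rfl hinv0]
    simp only [List.map_cons]
    rw [gAux_cons]
    have e : eqOC (some x) none = false := rfl
    simp only [e, Bool.false_eq_true, if_false]
    rw [if_neg (by decide : ¬ PySem.Int.mod (1:Int) 3 = 0)]
    rw [show PySem.Int.floordiv (1 : Int) 3 = 0 by decide]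
    ring
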